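-- pv_equiv track=rewrite | github.com/kkw2758/Algorithm | 구현/baek_21611.py | break_balls
-- ===== SOURCE A (Python) =====
-- def break_balls(balls):
--   score = 0
--   temp = []
--   cnt = 1
--   if balls:
--     before = balls[0]
--     for ball in balls[1:]:
--       if before == ball:
--         cnt += 1
--       else:
--         if 0 < cnt < 4:
--           temp += [before] * cnt
--         elif cnt >= 4:
--           score += before * cnt
--         cnt = 1
--         before = ball
--
--     if 0 < cnt < 4:
--       temp += [before] * cnt
--     elif cnt >= 4:
--       score += before * cnt
--
--   return temp, score
-- ===== SOURCE B (Python) =====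
-- def break_balls(balls):
--     # Pass 1: run-length encode the list (last run is extended in place),
--     # so no trailing-flush special case is needed.
--     runs = []
--     for b in balls:
--         if runs and runs[-1][0] == b:
--             v, c = runs[-1]
--             runs[-1] = (v, c + 1)
--         else:
--             runs.append((b, 1))
--     # Pass 2: short runs are kept, long runs (>= 4) are scored.
--     temp = []
--     score = 0
--     for v, c in runs:
--         if c < 4:
--             temp += [v] * c
--         else:
--             score += v * c
--     return temp, score
-- ===== Notes on version B (the rewrite author's own statement) =====
-- stated objective: alternative
-- what changed: Replaced A's before/cnt state machine with its duplicated trailing-flush block by a two-pass grouped form: first run-length encode the list, then one uniform keep-or-score pass over the runs, so every run is handled by the same code and no trailing flush exists.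
import Mathlib
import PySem

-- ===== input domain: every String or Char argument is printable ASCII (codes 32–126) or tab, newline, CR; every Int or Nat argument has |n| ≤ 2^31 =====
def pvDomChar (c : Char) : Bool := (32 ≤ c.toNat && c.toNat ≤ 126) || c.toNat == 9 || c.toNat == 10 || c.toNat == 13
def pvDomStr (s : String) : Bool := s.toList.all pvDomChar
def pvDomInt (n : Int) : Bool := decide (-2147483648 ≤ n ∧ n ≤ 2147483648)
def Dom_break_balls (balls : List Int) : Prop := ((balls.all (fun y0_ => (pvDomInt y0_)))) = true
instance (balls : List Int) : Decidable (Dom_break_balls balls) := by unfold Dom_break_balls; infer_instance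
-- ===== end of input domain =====

-- B replaces A's before/cnt state machine (with its duplicated trailing-flush block)
-- by a two-pass grouped form: run-length encode, then one uniform keep-or-score pass.

-- ===== PORT A =====
-- One loop step of A: state is (score, temp, cnt, before).
def pvAStep (s : Int × List Int × Int × Int) (ball : Int) : Int × List Int × Int × Int :=
  match s with
  | (score, temp, cnt, before) =>
    if before = ball then (score, temp, cnt + 1, before)
    else if 0 < cnt ∧ cnt < 4 then (score, temp ++ List.replicate cnt.toNat before, 1, ball)
    else if 4 ≤ cnt then (score + before * cnt, temp, 1, ball)
    else (score, temp, 1, ball)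

-- A's trailing flush after the loop.
def pvAFin (s : Int × List Int × Int × Int) : List Int × Int :=
  match s with
  | (score, temp, cnt, before) =>
    if 0 < cnt ∧ cnt < 4 then (temp ++ List.replicate cnt.toNat before, score)
    else if 4 ≤ cnt then (temp, score + before * cnt)
    else (temp, score)

def break_balls (balls : List Int) : List Int × Int :=
  match balls with
  | [] => ([], 0)
  | b0 :: rest => pvAFin (rest.foldl pvAStep (0, [], 1, b0))

-- ===== PORT B =====
-- Source B pass 1 body: extend the last run in place, or append a fresh run.
def pvPush (runs : List (Int × Int)) (b : Int) : List (Int × Int) :=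
  match runs with
  | [] => [(b, 1)]
  | [(v, c)] => if v = b then [(v, c + 1)] else [(v, c), (b, 1)]
  | r :: rest => r :: pvPush rest b

-- Source B pass 2 body: keep a short run, score a long one.
def pvTallyStep (acc : List Int × Int) (r : Int × Int) : List Int × Int :=
  if r.2 < 4 then (acc.1 ++ List.replicate r.2.toNat r.1, acc.2)
  else (acc.1, acc.2 + r.1 * r.2)

def break_balls_alt (balls : List Int) : List Int × Int :=
  (balls.foldl pvPush []).foldl pvTallyStep ([], 0)

-- ===== PRECONDITION & SPEC =====
def Spec_break_balls (balls : List Int) (out : List Int × Int) : Prop := out = break_balls_alt balls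
instance (balls : List Int) (out : List Int × Int) : Decidable (Spec_break_balls balls out) := by unfold Spec_break_balls; infer_instance

-- ===== CLAIM (what is proved, stated in full; the proofs are below) =====
def Claim_equal_break_balls : Prop := ∀ (balls : List Int), Dom_break_balls balls → Spec_break_balls balls (break_balls balls)

-- ===== LEMMAS AND PROOFS =====

theorem pvPush_ne_nil (runs : List (Int × Int)) (b : Int) : pvPush runs b ≠ [] := by
  match runs with
  | [] => simp [pvPush]
  | [(v, c)] => by_cases h : v = b <;> simp [pvPush, h]
  | r :: r' :: rest => simp [pvPush]

-- A run already followed by another run is "done": pvPush never touches it again.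
theorem pvPush_foldl_cons (xs : List Int) : ∀ (d : Int × Int) (D : List (Int × Int)), D ≠ [] →
    xs.foldl pvPush (d :: D) = d :: xs.foldl pvPush D := by
  induction xs with
  | nil => intro d D _; rfl
  | cons b xs ih =>
    intro d D hD
    obtain ⟨e, l, rfl⟩ : ∃ e l, D = e :: l := by
      cases D with
      | nil => exact absurd rfl hD
      | cons e l => exact ⟨e, l, rfl⟩
    have step : pvPush (d :: e :: l) b = d :: pvPush (e :: l) b := rfl
    simp only [List.foldl_cons, step]
    exact ih d (pvPush (e :: l) b) (pvPush_ne_nil _ _)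

-- Tally with a nonzero accumulator = tally from scratch, shifted.
theorem pvTally_shift (L : List (Int × Int)) : ∀ (t : List Int) (s : Int),
    L.foldl pvTallyStep (t, s)
      = (t ++ (L.foldl pvTallyStep ([], 0)).1, s + (L.foldl pvTallyStep ([], 0)).2) := by
  induction L with
  | nil => intro t s; simp
  | cons r L ih =>
    intro t s
    obtain ⟨v, c⟩ := r
    simp only [List.foldl_cons]
    by_cases h : c < 4
    · simp only [pvTallyStep, h, if_pos, List.nil_append]
      rw [ih, ih (List.replicate c.toNat v) 0]
      simp
    · simp only [pvTallyStep, h, if_neg, not_false_iff]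
      rw [ih, ih [] (0 + v * c)]
      simp [add_assoc]

-- Main invariant: A's state (score, temp, cnt, v) corresponds to B having pending run (v, cnt)
-- with temp/score as the tally shift.
theorem pv_main (xs : List Int) : ∀ (v cnt : Int) (temp : List Int) (score : Int), 1 ≤ cnt →
    pvAFin (xs.foldl pvAStep (score, temp, cnt, v))
      = (temp ++ ((xs.foldl pvPush [(v, cnt)]).foldl pvTallyStep ([], 0)).1,
         score + ((xs.foldl pvPush [(v, cnt)]).foldl pvTallyStep ([], 0)).2) := by
  induction xs with
  | nil =>
    intro v cnt temp score hcnt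
    by_cases h : cnt < 4
    · simp [pvAFin, pvTallyStep, h, show 0 < cnt by omega]
    · simp [pvAFin, pvTallyStep, h, show 4 ≤ cnt by omega]
  | cons b xs ih =>
    intro v cnt temp score hcnt
    simp only [List.foldl_cons]
    by_cases hv : v = b
    · have hA : pvAStep (score, temp, cnt, v) b = (score, temp, cnt + 1, v) := by
        simp [pvAStep, hv]
      have hB : pvPush [(v, cnt)] b = [(v, cnt + 1)] := by simp [pvPush, hv]
      rw [hA, hB]
      exact ih v (cnt + 1) temp score (by omega)
    · have hB : pvPush [(v, cnt)] b = [(v, cnt), (b, 1)] := by simp [pvPush, hv]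
      rw [hB, pvPush_foldl_cons xs (v, cnt) [(b, 1)] (by simp)]
      simp only [List.foldl_cons]
      by_cases h : cnt < 4
      · have hA : pvAStep (score, temp, cnt, v) b
            = (score, temp ++ List.replicate cnt.toNat v, 1, b) := by
          simp [pvAStep, hv, show 0 < cnt ∧ cnt < 4 from ⟨by omega, h⟩]
        rw [hA, ih b 1 (temp ++ List.replicate cnt.toNat v) score (by omega),
            show pvTallyStep ([], 0) (v, cnt) = (List.replicate cnt.toNat v, 0) by
              simp [pvTallyStep, h],
            pvTally_shift _ (List.replicate cnt.toNat v) 0]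
        simp
      · have hA : pvAStep (score, temp, cnt, v) b = (score + v * cnt, temp, 1, b) := by
          simp [pvAStep, hv, show ¬(0 < cnt ∧ cnt < 4) by omega, show 4 ≤ cnt by omega]
        rw [hA, ih b 1 temp (score + v * cnt) (by omega),
            show pvTallyStep ([], 0) (v, cnt) = ([], 0 + v * cnt) by
              simp [pvTallyStep, h],
            pvTally_shift _ [] (0 + v * cnt)]
        simp [add_assoc]

-- ===== VERDICT (by name: the statement is the Claim_ definition above) =====
theorem break_balls_spec : Claim_equal_break_balls := by
  intro balls _
  unfold Spec_break_balls break_balls break_balls_alt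
  cases balls with
  | nil => rfl
  | cons b0 rest =>
    have h0 : pvPush [] b0 = [(b0, 1)] := rfl
    simp only [List.foldl_cons, h0]
    rw [pv_main rest b0 1 [] 0 (by omega)]
    simp
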